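-- pv_equiv track=rewrite | github.com/tmb088/5v5Thursday | webapp.py | analyze_stats
-- ===== SOURCE A (Python) =====
-- from collections import defaultdict
--
-- def analyze_stats(player_data):
--     """Analyze player performance and synergy statistics"""
--     performance = defaultdict(lambda: {'score': 0, 'games': 0, 'wins': 0, 'losses': 0, 'draws': 0})
--     synergy = defaultdict(lambda: defaultdict(int))
--
--     if not player_data:
--         return performance, synergy
--
--     # Find maximum number of games
--     num_days = max(len(games) for games in player_data.values()) if player_data else 0
--
--     for day_index in range(num_days):
--         red_team = []
--         white_team = []
--
--         for player, games in player_data.items():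
--             if day_index >= len(games):
--                 continue
--
--             team, result = games[day_index]
--
--             if result in ['W', 'D', 'L']:
--                 performance[player]['games'] += 1
--                 score = {'W': 1, 'D': 0, 'L': -1}[result]
--                 performance[player]['score'] += score
--
--                 # Track wins, losses, draws
--                 if result == 'W':
--                     performance[player]['wins'] += 1
--                 elif result == 'L':
--                     performance[player]['losses'] += 1
--                 else:
--                     performance[player]['draws'] += 1
--
--                 if team == 'red':
--                     red_team.append(player)
--                 elif team == 'white':
--                     white_team.append(player)
--
--         # Update synergy counts for players who played together on the same team
--         for i, p1 in enumerate(red_team):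
--             for p2 in red_team[i+1:]:
--                 synergy[p1][p2] += 1
--                 synergy[p2][p1] += 1
--
--         for i, p1 in enumerate(white_team):
--             for p2 in white_team[i+1:]:
--                 synergy[p1][p2] += 1
--                 synergy[p2][p1] += 1
--
--     return performance, synergy
-- ===== SOURCE B (Python) =====
-- from collections import defaultdict
--
-- def analyze_stats(player_data):
--     """Analyze player performance and synergy statistics"""
--     performance = defaultdict(lambda: {'score': 0, 'games': 0, 'wins': 0, 'losses': 0, 'draws': 0})
--     synergy = defaultdict(lambda: defaultdict(int))
--
--     # One pass over the input: index the valid entries by day, track the max day count.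
--     buckets = defaultdict(list)
--     num_days = 0
--     for player, games in player_data.items():
--         num_days = max(num_days, len(games))
--         for day, (team, result) in enumerate(games):
--             if result in ('W', 'D', 'L'):
--                 buckets[day].append((player, team, result))
--
--     # Second phase: walk the day buckets in order.
--     for day in range(num_days):
--         teams = {'red': [], 'white': []}
--         for player, team, result in buckets.get(day, ()):
--             stats = performance[player]
--             stats['games'] += 1
--             stats['score'] += {'W': 1, 'D': 0, 'L': -1}[result]
--             stats['wins' if result == 'W' else 'losses' if result == 'L' else 'draws'] += 1
--             if team in teams:
--                 teams[team].append(player)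
--         for members in teams.values():
--             rest = list(members)
--             while rest:
--                 p1 = rest.pop(0)
--                 for p2 in rest:
--                     synergy[p1][p2] += 1
--                     synergy[p2][p1] += 1
--     return performance, synergy
-- ===== Notes on version B (the rewrite author's own statement) =====
-- stated objective: alternative
-- what changed: Instead of scanning every player for every day index (day-major nested loops with a skip), B makes one pass over the players building a day-indexed bucket of valid (player, team, result) entries plus the max game count, then a second phase walks the day buckets to accumulate performance, team lists and pairwise synergy.
import Mathlib
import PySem

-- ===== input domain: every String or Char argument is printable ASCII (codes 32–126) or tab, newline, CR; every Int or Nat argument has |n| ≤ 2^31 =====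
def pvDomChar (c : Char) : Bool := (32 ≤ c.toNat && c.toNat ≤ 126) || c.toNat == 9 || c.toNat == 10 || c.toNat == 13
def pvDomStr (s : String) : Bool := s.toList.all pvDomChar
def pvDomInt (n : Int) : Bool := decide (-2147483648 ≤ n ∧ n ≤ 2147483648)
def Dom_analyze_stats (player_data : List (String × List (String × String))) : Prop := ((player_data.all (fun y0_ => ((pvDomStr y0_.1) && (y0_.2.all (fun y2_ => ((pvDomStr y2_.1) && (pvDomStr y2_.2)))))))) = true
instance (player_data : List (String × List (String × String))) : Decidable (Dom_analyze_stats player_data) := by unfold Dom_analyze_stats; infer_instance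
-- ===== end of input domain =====

-- B re-implements A by a different decomposition: one pass over the players builds a day-indexed
-- bucket of the valid entries, then a second phase walks the day buckets; same return value.

abbrev PvSD := PySem.Dict String (PySem.Dict String Int)

-- ===== PORT A =====
-- default of performance's defaultdict: {'score':0,'games':0,'wins':0,'losses':0,'draws':0}
def aPerfDefault : PySem.Dict String Int :=
  PySem.Dict.mk [("score", 0), ("games", 0), ("wins", 0), ("losses", 0), ("draws", 0)]

-- the three 'performance[player][...] += ...' statements (defaultdict auto-creation = getD default)
def aUpdPerf (perf : PvSD) (p r : String) : PvSD :=
  let cur := perf.getD p aPerfDefault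
  let cur := cur.insert "games" (cur.getD "games" 0 + 1)
  let cur := cur.insert "score" (cur.getD "score" 0 + (if r = "W" then 1 else if r = "D" then 0 else (-1 : Int)))
  let cur := if r = "W" then cur.insert "wins" (cur.getD "wins" 0 + 1)
    else if r = "L" then cur.insert "losses" (cur.getD "losses" 0 + 1)
    else cur.insert "draws" (cur.getD "draws" 0 + 1)
  perf.insert p cur

-- synergy[p1][p2] += 1  (nested defaultdicts)
def aUpdSyn (syn : PvSD) (p1 p2 : String) : PvSD :=
  let inner := syn.getD p1 (PySem.Dict.mk [])
  syn.insert p1 (inner.insert p2 (inner.getD p2 0 + 1))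

-- for i, p1 in enumerate(team): for p2 in team[i+1:]: synergy[p1][p2] += 1; synergy[p2][p1] += 1
def aSynTeam : PvSD → List String → PvSD
  | syn, [] => syn
  | syn, p1 :: rest => aSynTeam (rest.foldl (fun s p2 => aUpdSyn (aUpdSyn s p1 p2) p2 p1) syn) rest

-- body of the inner player loop once (team, result) is read and result is valid
def aHandle (acc : PvSD × List String × List String) (p team result : String) :
    PvSD × List String × List String :=
  (aUpdPerf acc.1 p result,
   if team = "red" then (acc.2.1 ++ [p], acc.2.2)
   else if team = "white" then (acc.2.1, acc.2.2 ++ [p])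
   else acc.2)

-- one iteration of 'for day_index in range(num_days)'
def aDayStep (player_data : List (String × List (String × String))) (state : PvSD × PvSD)
    (day : Nat) : PvSD × PvSD :=
  let inner := player_data.foldl (fun acc pg =>
      if h : day < pg.2.length then
        let tr := pg.2[day]
        if tr.2 = "W" || tr.2 = "D" || tr.2 = "L" then aHandle acc pg.1 tr.1 tr.2 else acc
      else acc)  -- 'if day_index >= len(games): continue'
    (state.1, [], [])
  (inner.1, aSynTeam (aSynTeam state.2 inner.2.1) inner.2.2)

def analyze_stats (player_data : List (String × List (String × String))) : (List (String × List (String × Int))) × (List (String × List (String × Int))) :=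
  if player_data = [] then ([], []) else
  let num_days := match player_data.map (fun pg => pg.2.length) with
    | [] => 0
    | h :: t => t.foldl max h   -- max(len(games) for games in player_data.values())
  let fin := (List.range num_days).foldl (aDayStep player_data) (PySem.Dict.mk [], PySem.Dict.mk [])
  (fin.1.items.map (fun q => (q.1, q.2.items)), fin.2.items.map (fun q => (q.1, q.2.items)))

-- ===== PORT B =====
def bPerfDefault : PySem.Dict String Int :=
  PySem.Dict.mk [("score", 0), ("games", 0), ("wins", 0), ("losses", 0), ("draws", 0)]

-- pass 1: num_days accumulator and the day -> [(player, team, result)] bucket index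
def bPass1 (player_data : List (String × List (String × String))) :
    Nat × PySem.Dict Int (List (String × String × String)) :=
  player_data.foldl (fun acc pg =>
      (max acc.1 pg.2.length,
       (PySem.List.enumerate pg.2).foldl (fun b e =>
           if e.2.2 = "W" || e.2.2 = "D" || e.2.2 = "L" then
             b.insert e.1 (b.getD e.1 [] ++ [(pg.1, e.2.1, e.2.2)])
           else b) acc.2))
    (0, PySem.Dict.mk [])

-- stats = performance[player]; stats['games'] += 1; stats['score'] += table[result]; stats[key] += 1
def bStats (perf : PvSD) (p r : String) : PvSD :=
  let stats := perf.getD p bPerfDefault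
  let stats := stats.insert "games" (stats.getD "games" 0 + 1)
  let stats := stats.insert "score" (stats.getD "score" 0 + (if r = "W" then 1 else if r = "D" then 0 else (-1 : Int)))
  let key := if r = "W" then "wins" else if r = "L" then "losses" else "draws"
  let stats := stats.insert key (stats.getD key 0 + 1)
  perf.insert p stats

def bInc (syn : PvSD) (p1 p2 : String) : PvSD :=
  let m := syn.getD p1 (PySem.Dict.mk [])
  syn.insert p1 (m.insert p2 (m.getD p2 0 + 1))

-- while rest: p1 = rest.pop(0); for p2 in rest: synergy[p1][p2] += 1; synergy[p2][p1] += 1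
def bPairs : PvSD → List String → PvSD
  | syn, [] => syn
  | syn, p1 :: rest => bPairs (rest.foldl (fun s p2 => bInc (bInc s p1 p2) p2 p1) syn) rest

-- one iteration of the bucket-walking day loop
def bDay (buckets : PySem.Dict Int (List (String × String × String))) (st : PvSD × PvSD)
    (day : Nat) : PvSD × PvSD :=
  let entries := buckets.getD (day : Int) []   -- buckets.get(day, ())
  let t := entries.foldl (fun (acc : PvSD × PySem.Dict String (List String)) e =>
      (bStats acc.1 e.1 e.2.2,
       if acc.2.contains e.2.1 then acc.2.insert e.2.1 (acc.2.getD e.2.1 [] ++ [e.1]) else acc.2))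
    (st.1, PySem.Dict.mk [("red", []), ("white", [])])
  (t.1, t.2.values.foldl bPairs st.2)

def analyze_stats_alt (player_data : List (String × List (String × String))) : (List (String × List (String × Int))) × (List (String × List (String × Int))) :=
  let pass := bPass1 player_data
  let fin := (List.range pass.1).foldl (bDay pass.2) (PySem.Dict.mk [], PySem.Dict.mk [])
  (fin.1.items.map (fun q => (q.1, q.2.items)), fin.2.items.map (fun q => (q.1, q.2.items)))

-- ===== PRECONDITION & SPEC =====
def Spec_analyze_stats (player_data : List (String × List (String × String))) (out : (List (String × List (String × Int))) × (List (String × List (String × Int)))) : Prop := out = analyze_stats_alt player_data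
instance (player_data : List (String × List (String × String))) (out : (List (String × List (String × Int))) × (List (String × List (String × Int)))) : Decidable (Spec_analyze_stats player_data out) := by unfold Spec_analyze_stats; infer_instance

-- ===== CLAIM (what is proved, stated in full; the proofs are below) =====
def Claim_equal_analyze_stats : Prop := ∀ (player_data : List (String × List (String × String))), Dom_analyze_stats player_data → Spec_analyze_stats player_data (analyze_stats player_data)

-- ===== LEMMAS AND PROOFS =====

-- canonical list of the valid (player, team, result) entries of day k, in player order
def pvEntriesAt (pd : List (String × List (String × String))) (k : Nat) :
    List (String × String × String) :=
  pd.flatMap (fun pg => match pg.2[k]? with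
    | some tr => if tr.2 = "W" || tr.2 = "D" || tr.2 = "L" then [(pg.1, tr.1, tr.2)] else []
    | none => [])

lemma pvStats_eq (perf : PvSD) (p r : String) : bStats perf p r = aUpdPerf perf p r := by
  by_cases h1 : r = "W" <;> by_cases h2 : r = "L" <;>
    simp [bStats, aUpdPerf, bPerfDefault, aPerfDefault, h1, h2]

lemma pvInc_eq : bInc = aUpdSyn := rfl

lemma pvPairs_eq (syn : PvSD) (l : List String) : bPairs syn l = aSynTeam syn l := by
  induction l generalizing syn with
  | nil => rfl
  | cons p1 rest ih => simp [bPairs, aSynTeam, pvInc_eq, ih]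

-- step of the bucket-building inner fold, abbreviated for the lemmas
def pvBStep (p : String) (b : PySem.Dict Int (List (String × String × String)))
    (e : Int × String × String) : PySem.Dict Int (List (String × String × String)) :=
  if e.2.2 = "W" || e.2.2 = "D" || e.2.2 = "L" then
    b.insert e.1 (b.getD e.1 [] ++ [(p, e.2.1, e.2.2)])
  else b

lemma pvBucketLt (games : List (String × String)) (p : String) (s : Int)
    (b : PySem.Dict Int (List (String × String × String))) (d : Int) (hd : d < s) :
    ((PySem.List.enumerate games s).foldl (pvBStep p) b).getD d [] = b.getD d [] := by
  induction games generalizing s b with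
  | nil => rfl
  | cons x xs ih =>
      rw [PySem.List.enumerate_cons, List.foldl_cons, ih (s + 1) _ (by omega)]
      unfold pvBStep
      split
      · rw [PySem.Dict.getD_insert]; simp [show d ≠ s by omega]
      · rfl

lemma pvBucketInner (games : List (String × String)) (p : String) (s : Int)
    (b : PySem.Dict Int (List (String × String × String))) (k : Nat) :
    ((PySem.List.enumerate games s).foldl (pvBStep p) b).getD (s + k) []
      = b.getD (s + k) [] ++ (match games[k]? with
          | some tr => if tr.2 = "W" || tr.2 = "D" || tr.2 = "L" then [(p, tr.1, tr.2)] else []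
          | none => []) := by
  induction games generalizing s b k with
  | nil => simp
  | cons x xs ih =>
      rw [PySem.List.enumerate_cons, List.foldl_cons]
      cases k with
      | zero =>
          rw [show s + (0 : Nat) = s by omega, pvBucketLt xs p (s + 1) _ s (by omega)]
          unfold pvBStep
          split
          · next hv => simp [hv]
          · next hv => simp at hv; simp [hv]
      | succ k =>
          rw [show s + ((k + 1 : Nat) : Int) = (s + 1) + (k : Nat) by push_cast; omega, ih]
          congr 1
          unfold pvBStep
          split
          · rw [PySem.Dict.getD_insert]; simp [show (s + 1) + (k : Nat) ≠ s by omega]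
          · rfl

lemma pvPass1Snd (pd : List (String × List (String × String)))
    (a : Nat × PySem.Dict Int (List (String × String × String))) :
    (pd.foldl (fun acc pg =>
      (max acc.1 pg.2.length,
       (PySem.List.enumerate pg.2).foldl (fun b e =>
           if e.2.2 = "W" || e.2.2 = "D" || e.2.2 = "L" then
             b.insert e.1 (b.getD e.1 [] ++ [(pg.1, e.2.1, e.2.2)])
           else b) acc.2)) a).2
    = pd.foldl (fun b pg => (PySem.List.enumerate pg.2).foldl (pvBStep pg.1) b) a.2 := by
  induction pd generalizing a with
  | nil => rfl
  | cons pg rest ih => rw [List.foldl_cons, List.foldl_cons, ih]; rfl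

lemma pvPass1Fst (pd : List (String × List (String × String)))
    (a : Nat × PySem.Dict Int (List (String × String × String))) :
    (pd.foldl (fun acc pg =>
      (max acc.1 pg.2.length,
       (PySem.List.enumerate pg.2).foldl (fun b e =>
           if e.2.2 = "W" || e.2.2 = "D" || e.2.2 = "L" then
             b.insert e.1 (b.getD e.1 [] ++ [(pg.1, e.2.1, e.2.2)])
           else b) acc.2)) a).1
    = pd.foldl (fun n pg => max n pg.2.length) a.1 := by
  induction pd generalizing a with
  | nil => rfl
  | cons pg rest ih => rw [List.foldl_cons, List.foldl_cons, ih]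

lemma pvBucketsGetD (pd : List (String × List (String × String))) (k : Nat) :
    (bPass1 pd).2.getD (k : Int) [] = pvEntriesAt pd k := by
  rw [bPass1, pvPass1Snd]
  suffices h : ∀ (b : PySem.Dict Int (List (String × String × String))),
      (pd.foldl (fun b pg => (PySem.List.enumerate pg.2).foldl (pvBStep pg.1) b) b).getD (k : Int) []
        = b.getD (k : Int) [] ++ pvEntriesAt pd k by
    simpa [PySem.Dict.getD] using h (PySem.Dict.mk [])
  induction pd with
  | nil => intro b; simp [pvEntriesAt]
  | cons pg rest ih =>
      intro b
      rw [List.foldl_cons, ih]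
      have := pvBucketInner pg.2 pg.1 0 b k
      rw [show (0 : Int) + (k : Nat) = (k : Int) by omega] at this
      rw [this]
      simp [pvEntriesAt]

lemma pvNumDays (pd : List (String × List (String × String))) (h : pd ≠ []) :
    (bPass1 pd).1 = (match pd.map (fun pg => pg.2.length) with
      | [] => 0
      | h :: t => t.foldl max h) := by
  rw [bPass1, pvPass1Fst]
  show pd.foldl (fun n pg => max n pg.2.length) 0 = _
  rw [show pd.foldl (fun n pg => max n pg.2.length) 0
      = (pd.map (fun pg => pg.2.length)).foldl max 0 from List.foldl_map.symm]
  cases pd with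
  | nil => exact absurd rfl h
  | cons pg rest => simp only [List.map_cons, List.foldl_cons, Nat.zero_max]

-- A's inner player loop equals the canonical fold over the day's valid entries
lemma pvADayFold (pd : List (String × List (String × String))) (day : Nat)
    (acc : PvSD × List String × List String) :
    (pd.foldl (fun acc pg =>
        if h : day < pg.2.length then
          let tr := pg.2[day]
          if tr.2 = "W" || tr.2 = "D" || tr.2 = "L" then aHandle acc pg.1 tr.1 tr.2 else acc
        else acc) acc)
    = (pvEntriesAt pd day).foldl (fun acc e => aHandle acc e.1 e.2.1 e.2.2) acc := by
  induction pd generalizing acc with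
  | nil => rfl
  | cons pg rest ih =>
      rw [List.foldl_cons, pvEntriesAt, List.flatMap_cons, List.foldl_append, ih]
      congr 1
      by_cases h : day < pg.2.length
      · rw [dif_pos h, List.getElem?_eq_getElem h]
        by_cases hv : (pg.2[day].2 = "W" || pg.2[day].2 = "D" || pg.2[day].2 = "L") = true
        · simp [hv]
        · simp [hv]
      · rw [dif_neg h, List.getElem?_eq_none (by omega)]
        rfl

-- B's inner entry loop simulates A's (perf, red, white) state through the teams dict
lemma pvBDayFold (entries : List (String × String × String)) (perf : PvSD)
    (r w : List String) :
    (entries.foldl (fun (acc : PvSD × PySem.Dict String (List String)) e =>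
        (bStats acc.1 e.1 e.2.2,
         if acc.2.contains e.2.1 then acc.2.insert e.2.1 (acc.2.getD e.2.1 [] ++ [e.1]) else acc.2))
      (perf, PySem.Dict.mk [("red", r), ("white", w)]))
    = (let res := entries.foldl (fun acc e => aHandle acc e.1 e.2.1 e.2.2) (perf, r, w)
       (res.1, PySem.Dict.mk [("red", res.2.1), ("white", res.2.2)])) := by
  induction entries generalizing perf r w with
  | nil => rfl
  | cons e rest ih =>
      rw [List.foldl_cons, List.foldl_cons]
      by_cases h1 : e.2.1 = "red"
      · rw [show (bStats perf e.1 e.2.2,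
          if (PySem.Dict.mk [("red", r), ("white", w)]).contains e.2.1 then _ else _)
          = (aUpdPerf perf e.1 e.2.2, PySem.Dict.mk [("red", r ++ [e.1]), ("white", w)]) from by
            simp [pvStats_eq, h1, PySem.Dict.contains, PySem.Dict.insert, PySem.Dict.getD, PySem.Dict.get?]]
        rw [ih, aHandle]; simp [h1]
      · by_cases h2 : e.2.1 = "white"
        · rw [show (bStats perf e.1 e.2.2,
            if (PySem.Dict.mk [("red", r), ("white", w)]).contains e.2.1 then _ else _)
            = (aUpdPerf perf e.1 e.2.2, PySem.Dict.mk [("red", r), ("white", w ++ [e.1])]) from by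
              simp [pvStats_eq, h2, PySem.Dict.contains, PySem.Dict.insert, PySem.Dict.getD, PySem.Dict.get?]]
          rw [ih, aHandle]; simp [h2]
        · rw [show (bStats perf e.1 e.2.2,
            if (PySem.Dict.mk [("red", r), ("white", w)]).contains e.2.1 then _ else _)
            = (aUpdPerf perf e.1 e.2.2, PySem.Dict.mk [("red", r), ("white", w)]) from by
              have h1' : ("red" : String) ≠ e.2.1 := fun hh => h1 hh.symm
              have h2' : ("white" : String) ≠ e.2.1 := fun hh => h2 hh.symm
              simp [pvStats_eq, PySem.Dict.contains, h1', h2']]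
          rw [ih, aHandle]; simp [h1, h2]

lemma pvDayEq (pd : List (String × List (String × String))) (st : PvSD × PvSD) (day : Nat) :
    aDayStep pd st day = bDay (bPass1 pd).2 st day := by
  rw [bDay, pvBucketsGetD, pvBDayFold, aDayStep, pvADayFold]
  simp [PySem.Dict.values, pvPairs_eq]

theorem pv_main (pd : List (String × List (String × String))) :
    analyze_stats pd = analyze_stats_alt pd := by
  by_cases h : pd = []
  · subst h; rfl
  · rw [analyze_stats, analyze_stats_alt, if_neg h, pvNumDays pd h]
    have : aDayStep pd = bDay (bPass1 pd).2 := funext fun st => funext fun d => pvDayEq pd st d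
    rw [this]

-- ===== VERDICT (by name: the statement is the Claim_ definition above) =====
theorem analyze_stats_spec : Claim_equal_analyze_stats := by
  intro pd _
  unfold Spec_analyze_stats
  exact pv_main pd
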